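-- pv_equiv track=rewrite | github.com/Lungelo99/Python-assignment-2 | Assignment 2 [210277897 ].py | no_teen_sum
-- ===== SOURCE A (Python) =====
-- def fix_teen(n):
--   """
--     Checks if a vaule is a teen or not
--
--   """
--   x = 0
--
--   while(x < len(n)):
--     if(n[x] in(13, 14, 17,18,19)):
--       n[x] = 0
--     x = x + 1
--
--   return n
--
-- def no_teen_sum(a,b,c):
--
--   """
--     Summing all non-teen values
--
--   """
--   list = []
--   list.append(a)
--   list.append(b)
--   list.append(c)
--
--   myTeen = fix_teen(list)
--   sum = 0
--   x = 0
--
--   for x in myTeen: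
--     sum = sum + x
--
--   return sum
-- ===== SOURCE B (Python) =====
-- TEENS = frozenset((13, 14, 17, 18, 19))
--
-- def no_teen_sum(a, b, c):
--     """Sum all three values unconditionally, then subtract back each teen value."""
--     total = a + b + c
--     if a in TEENS:
--         total -= a
--     if b in TEENS:
--         total -= b
--     if c in TEENS:
--         total -= c
--     return total
-- ===== Notes on version B (the rewrite author's own statement) =====
-- stated objective: alternative
-- what changed: B uses a subtractive correction: it adds all three arguments unconditionally and then subtracts each value that lies in the teen set, instead of A's build-a-list, zero-out-teens-in-place, then sum loop.
import Mathlib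
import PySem

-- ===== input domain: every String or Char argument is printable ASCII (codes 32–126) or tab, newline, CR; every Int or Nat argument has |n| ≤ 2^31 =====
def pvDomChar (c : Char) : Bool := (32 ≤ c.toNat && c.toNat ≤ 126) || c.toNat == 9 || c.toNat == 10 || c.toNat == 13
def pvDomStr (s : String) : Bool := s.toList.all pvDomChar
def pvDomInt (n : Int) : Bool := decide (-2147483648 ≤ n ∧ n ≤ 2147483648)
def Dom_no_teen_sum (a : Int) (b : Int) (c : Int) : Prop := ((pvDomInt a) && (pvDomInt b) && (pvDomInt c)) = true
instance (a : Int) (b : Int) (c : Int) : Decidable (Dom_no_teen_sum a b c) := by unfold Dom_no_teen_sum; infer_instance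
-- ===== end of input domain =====

-- B sums all three arguments unconditionally and then subtracts back each teen value, instead of A's list build + in-place zeroing loop + summing loop (objective: alternative).


-- ===== PORT A =====
-- while loop of fix_teen: index x over the list, setting teens to 0 in place
def fixTeenLoop (n : List Int) (x : Nat) : List Int :=
  if _h : x < n.length then
    fixTeenLoop (if n[x]! = 13 ∨ n[x]! = 14 ∨ n[x]! = 17 ∨ n[x]! = 18 ∨ n[x]! = 19
                 then n.set x 0 else n) (x + 1)
  else n
termination_by n.length - x
decreasing_by
  split <;> simp_all <;> omega

def fix_teen (n : List Int) : List Int := fixTeenLoop n 0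

def no_teen_sum (a : Int) (b : Int) (c : Int) : Int :=
  let list := ([] : List Int) ++ [a] ++ [b] ++ [c]
  let myTeen := fix_teen list
  myTeen.foldl (fun sum x => sum + x) 0

-- ===== PORT B =====
-- TEENS = frozenset((13,14,17,18,19)); membership test
def memTeens (n : Int) : Bool := (PySem.Set.ofList [13, 14, 17, 18, 19]).contains n

def no_teen_sum_alt (a : Int) (b : Int) (c : Int) : Int :=
  let total := a + b + c
  let total := if memTeens a then total - a else total
  let total := if memTeens b then total - b else total
  let total := if memTeens c then total - c else total
  total

-- ===== PRECONDITION & SPEC =====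
def Spec_no_teen_sum (a : Int) (b : Int) (c : Int) (out : Int) : Prop := out = no_teen_sum_alt a b c
instance (a : Int) (b : Int) (c : Int) (out : Int) : Decidable (Spec_no_teen_sum a b c out) := by unfold Spec_no_teen_sum; infer_instance

-- ===== CLAIM (what is proved, stated in full; the proofs are below) =====
def Claim_equal_no_teen_sum : Prop := ∀ (a : Int) (b : Int) (c : Int), Dom_no_teen_sum a b c → Spec_no_teen_sum a b c (no_teen_sum a b c)

-- ===== LEMMAS AND PROOFS =====

-- ===== VERDICT (by name: the statement is the Claim_ definition above) =====
theorem no_teen_sum_spec : Claim_equal_no_teen_sum := by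
  intro a b c _
  show _ = _
  unfold no_teen_sum no_teen_sum_alt fix_teen memTeens
  by_cases h1 : a = 13 ∨ a = 14 ∨ a = 17 ∨ a = 18 ∨ a = 19 <;>
  by_cases h2 : b = 13 ∨ b = 14 ∨ b = 17 ∨ b = 18 ∨ b = 19 <;>
  by_cases h3 : c = 13 ∨ c = 14 ∨ c = 17 ∨ c = 18 ∨ c = 19 <;>
    simp [fixTeenLoop, PySem.Set.ofList, PySem.Set.add, h1, h2, h3, List.foldl] <;>
    omega
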